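-- pv_equiv track=rewrite | github.com/FNA2003/grupo1-tp1-v1 | lexer/AFDs.py | afd_comparation
-- ===== SOURCE A (Python) =====
-- def afd_comparation(cadena):
--     """Los estados aceptado son 1, 2 y 3"""
--     estados_sin_trampa = [0, 1, 2, 3]
--     estados_aceptados = [1, 2, 3]
--     estados_no_aceptados = [0]
--     estado_trampa = 't'
--     estado = 0
--     caracteres = ['<', '>', '=']
--     delta = {
--     0: {'<': 1, '>': 2, '=': 3},
--     1: {'<': 't', '>': 3, '=': 3},
--     2: {'<': 't', '>': 't', '=': 3},
--     3: {'<': 't', '>': 't', '=': 't'},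
--     't': {'<': 't', '>': 't', '=': 't'}
--     }
--
--     for caracter in cadena:
--         if (estado in estados_sin_trampa) and (caracter in caracteres):
--             estado = delta[estado][caracter]
--         elif (estado == 't') or not(caracter in caracteres):
--             estado = 't'
--             break
--
--     if estado in estados_aceptados:
--         estado_final = 'aceptado'
--     elif estado in estados_no_aceptados:
--         estado_final = 'no aceptado'
--     elif estado == estado_trampa:
--         estado_final = 'trampa'
--
--     return estado_final
-- ===== SOURCE B (Python) =====
-- def afd_comparation(cadena):
--     """The automaton's whole language is the six comparison operators;
--     classify by direct membership instead of stepping through states."""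
--     if not cadena:
--         return 'no aceptado'
--     return 'aceptado' if cadena in {'<', '>', '=', '<=', '>=', '<>'} else 'trampa'
-- ===== Notes on version B (the rewrite author's own statement) =====
-- stated objective: simpler
-- what changed: Replaces the DFA state-transition loop with a direct membership test against the automaton's full (finite) language {'<','>','=','<=','>=','<>'}, with empty input mapped to 'no aceptado'.
import Mathlib
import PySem

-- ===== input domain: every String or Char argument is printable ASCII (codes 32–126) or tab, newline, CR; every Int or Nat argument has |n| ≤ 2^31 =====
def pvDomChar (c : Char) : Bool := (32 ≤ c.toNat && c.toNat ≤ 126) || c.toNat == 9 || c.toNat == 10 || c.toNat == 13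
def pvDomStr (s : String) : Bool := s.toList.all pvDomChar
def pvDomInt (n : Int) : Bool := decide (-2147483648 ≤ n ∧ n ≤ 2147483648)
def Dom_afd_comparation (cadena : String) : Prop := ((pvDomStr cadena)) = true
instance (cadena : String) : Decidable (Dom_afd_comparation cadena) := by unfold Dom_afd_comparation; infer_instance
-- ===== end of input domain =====

-- B replaces A's DFA state-transition loop by a direct membership test against the
-- automaton's full six-word language (simpler); proved equal to A on all domain strings.


-- ===== PORT A =====
-- Python's estado ranges over {0, 1, 2, 3, 't'}: an explicit five-value state type.
inductive AfdSt where
  | s0 | s1 | s2 | s3 | st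
  deriving DecidableEq, Repr

-- the Python dict 'delta' as a lookup function (total on the states/chars the loop feeds it)
def afdDelta : AfdSt → Char → AfdSt
  | AfdSt.s0, '<' => AfdSt.s1
  | AfdSt.s0, '>' => AfdSt.s2
  | AfdSt.s0, '=' => AfdSt.s3
  | AfdSt.s1, '<' => AfdSt.st
  | AfdSt.s1, '>' => AfdSt.s3
  | AfdSt.s1, '=' => AfdSt.s3
  | AfdSt.s2, '<' => AfdSt.st
  | AfdSt.s2, '>' => AfdSt.st
  | AfdSt.s2, '=' => AfdSt.s3
  | AfdSt.s3, _   => AfdSt.st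
  | AfdSt.st, _   => AfdSt.st
  | _, _ => AfdSt.st   -- other chars: never consulted (the guard requires caracter ∈ caracteres)

-- the for-loop with its break: recursion over the characters carrying 'estado'
def afdLoop : AfdSt → List Char → AfdSt
  | estado, [] => estado
  | estado, caracter :: rest =>
    if estado ∈ [AfdSt.s0, AfdSt.s1, AfdSt.s2, AfdSt.s3] ∧ caracter ∈ ['<', '>', '='] then
      afdLoop (afdDelta estado caracter) rest
    else if estado = AfdSt.st ∨ caracter ∉ ['<', '>', '='] then
      AfdSt.st               -- estado = 't'; break
    else
      afdLoop estado rest    -- no branch taken: continue (unreachable in Python, kept literal)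

def afd_comparation (cadena : String) : String :=
  let estado := afdLoop AfdSt.s0 cadena.toList
  if estado ∈ [AfdSt.s1, AfdSt.s2, AfdSt.s3] then "aceptado"
  else if estado ∈ [AfdSt.s0] then "no aceptado"
  else "trampa"   -- remaining case is exactly estado = 't' (Python's final elif)

-- ===== PORT B =====
def afd_comparation_alt (cadena : String) : String :=
  if cadena = "" then "no aceptado"
  else if cadena ∈ ["<", ">", "=", "<=", ">=", "<>"] then "aceptado"
  else "trampa"

-- ===== PRECONDITION & SPEC =====
def Spec_afd_comparation (cadena : String) (out : String) : Prop := out = afd_comparation_alt cadena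
instance (cadena : String) (out : String) : Decidable (Spec_afd_comparation cadena out) := by unfold Spec_afd_comparation; infer_instance

-- ===== CLAIM (what is proved, stated in full; the proofs are below) =====
def Claim_equal_afd_comparation : Prop := ∀ (cadena : String), Dom_afd_comparation cadena → Spec_afd_comparation cadena (afd_comparation cadena)

-- ===== LEMMAS AND PROOFS =====

theorem afdLoop_st (l : List Char) : afdLoop AfdSt.st l = AfdSt.st := by
  cases l with
  | nil => rfl
  | cons c cs => simp [afdLoop]

theorem afdLoop_s3 (l : List Char) (h : l ≠ []) : afdLoop AfdSt.s3 l = AfdSt.st := by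
  cases l with
  | nil => exact absurd rfl h
  | cons c cs =>
    by_cases hc : c ∈ ['<', '>', '=']
    · simp only [List.mem_cons, List.not_mem_nil, or_false] at hc
      rcases hc with rfl | rfl | rfl <;> simp [afdLoop, afdDelta, afdLoop_st]
    · simp [afdLoop, hc]

-- one loop iteration when the first (non-trap, recognised-char) branch fires
theorem afdLoop_step (e : AfdSt) (he : e ∈ [AfdSt.s0, AfdSt.s1, AfdSt.s2, AfdSt.s3])
    (c : Char) (hc : c ∈ ['<', '>', '=']) (l : List Char) :
    afdLoop e (c :: l) = afdLoop (afdDelta e c) l := by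
  simp [afdLoop, he, hc]

theorem afdLoop_tail (z : AfdSt) (hz : z = AfdSt.s3 ∨ z = AfdSt.st)
    (e : Char) (es : List Char) : afdLoop z (e :: es) = AfdSt.st := by
  rcases hz with rfl | rfl
  · exact afdLoop_s3 _ (by simp)
  · exact afdLoop_st _

theorem toList_eq_iff (s lit : String) : s = lit ↔ s.toList = lit.toList :=
  ⟨fun h => h ▸ rfl, fun h => String.toList_injective h⟩

theorem afd_main (cadena : String) :
    afd_comparation cadena = afd_comparation_alt cadena := by
  unfold afd_comparation afd_comparation_alt
  have h1 : (cadena = "") ↔ (cadena.toList = []) := toList_eq_iff cadena ""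
  have h2 : (cadena ∈ ["<", ">", "=", "<=", ">=", "<>"]) ↔
      (cadena.toList ∈ [['<'], ['>'], ['='], ['<','='], ['>','='], ['<','>']]) := by
    simp only [List.mem_cons, List.not_mem_nil, or_false, toList_eq_iff]
    rfl
  simp only [h1, h2]
  clear h1 h2
  generalize cadena.toList = l
  match l with
  | [] => simp [afdLoop]
  | [c] =>
    by_cases hc : c ∈ ['<', '>', '=']
    · simp only [List.mem_cons, List.not_mem_nil, or_false] at hc
      rcases hc with rfl | rfl | rfl <;> decide
    · have hc' := hc
      simp only [List.mem_cons, List.not_mem_nil, or_false, not_or] at hc'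
      obtain ⟨g1, g2, g3⟩ := hc'
      simp [afdLoop, hc, g1, g2, g3]
  | c :: d :: rest =>
    by_cases hc : c ∈ ['<', '>', '=']
    · by_cases hd : d ∈ ['<', '>', '=']
      · simp only [List.mem_cons, List.not_mem_nil, or_false] at hc hd
        rcases hc with rfl | rfl | rfl <;> rcases hd with rfl | rfl | rfl <;>
          (rw [afdLoop_step _ (by decide) _ (by decide),
               afdLoop_step _ (by decide) _ (by decide)]
           cases rest with
           | nil => decide
           | cons e es => rw [afdLoop_tail _ (by decide)]; simp)
      · have hd' := hd
        simp only [List.mem_cons, List.not_mem_nil, or_false, not_or] at hd'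
        obtain ⟨g1, g2, g3⟩ := hd'
        simp only [List.mem_cons, List.not_mem_nil, or_false] at hc
        rcases hc with rfl | rfl | rfl <;>
          (rw [afdLoop_step _ (by decide) _ (by decide)]
           simp [afdLoop, afdDelta, hd, g1, g2, g3])
    · have hc' := hc
      simp only [List.mem_cons, List.not_mem_nil, or_false, not_or] at hc'
      obtain ⟨g1, g2, g3⟩ := hc'
      simp [afdLoop, hc, g1, g2, g3]

-- ===== VERDICT (by name: the statement is the Claim_ definition above) =====
theorem afd_comparation_spec : Claim_equal_afd_comparation := by
  intro cadena _
  unfold Spec_afd_comparation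
  exact afd_main cadena
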